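-- pv_equiv track=rewrite | github.com/MarcoGomezGutierrez/Progra_Web_II | practica-juego/src/rotate.py | transform
-- ===== SOURCE A (Python) =====
-- def transform(array):
--     matriz10x10 = [[0 for i in range(10)] for j in range(10)] # matriz de 10x10 inicializada con ceros
--     idx_matriz = 0 # contador para el índice de la matriz5
--     for i in range(10): # recorremos las filas de la matriz de 10x10
--         for j in range(10): # recorremos las columnas de la matriz de 10x10
--             if idx_matriz < len(array): # si quedan elementos por agregar
--                 matriz10x10[i][j] = array[idx_matriz] # agregamos el valor a la matriz de 10x10
--                 idx_matriz += 1 # incrementamos el índice de la matriz5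
--     return matriz10x10
-- ===== SOURCE B (Python) =====
-- def transform(array):
--     padded = array[:100] + [0] * (100 - len(array))
--     return [padded[i * 10:(i + 1) * 10] for i in range(10)]
-- ===== Notes on version B (the rewrite author's own statement) =====
-- stated objective: simpler
-- what changed: Replaces the 10x10 element-by-element counter loop with a bounds check per cell by a two-phase pad-then-reshape: normalize the input to exactly 100 elements (truncate/zero-pad), then chunk it into ten row slices.
import Mathlib
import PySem

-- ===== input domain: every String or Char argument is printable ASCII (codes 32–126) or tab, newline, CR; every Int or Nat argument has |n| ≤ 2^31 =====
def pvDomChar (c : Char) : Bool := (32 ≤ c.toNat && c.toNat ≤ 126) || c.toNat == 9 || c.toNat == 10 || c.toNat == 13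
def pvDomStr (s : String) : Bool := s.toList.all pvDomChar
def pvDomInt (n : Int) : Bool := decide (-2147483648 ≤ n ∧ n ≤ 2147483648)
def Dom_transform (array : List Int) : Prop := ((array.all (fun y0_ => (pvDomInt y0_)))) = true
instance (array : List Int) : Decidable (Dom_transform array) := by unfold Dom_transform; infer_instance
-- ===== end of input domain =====

-- B pads/truncates the flat list to exactly 100 entries, then chunks it into ten slices of ten;
-- A fills a zero matrix cell by cell with a running index and a bounds check. Return values proved equal.

-- ===== PORT A =====
-- literal port: zero 10x10 matrix, running index, per-cell bounds check; the loop state is (matrix, idx)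
def transform (array : List Int) : List (List Int) :=
  let matriz10x10 := (List.range 10).map (fun _ => (List.range 10).map (fun _ => (0 : Int)))
  let st := (List.range 10).foldl (fun st i =>
      (List.range 10).foldl (fun (st : List (List Int) × Nat) j =>
        if st.2 < array.length then
          (st.1.set i ((st.1.getD i []).set j (array.getD st.2 0)), st.2 + 1)
        else st) st) (matriz10x10, 0)
  st.1

-- ===== PORT B =====
-- literal port of Source B: padded = array[:100] + [0]*(100-len(array)); rows are padded[i*10:(i+1)*10]
def transform_alt (array : List Int) : List (List Int) :=
  let padded := PySem.List.slice array none (some 100) ++ List.replicate (100 - array.length) 0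
  (List.range 10).map (fun (i : Nat) =>
    PySem.List.slice padded (some ((i : Int) * 10)) (some (((i : Int) + 1) * 10)))

-- ===== PRECONDITION & SPEC =====
def Spec_transform (array : List Int) (out : List (List Int)) : Prop := out = transform_alt array
instance (array : List Int) (out : List (List Int)) : Decidable (Spec_transform array out) := by unfold Spec_transform; infer_instance

-- ===== CLAIM (what is proved, stated in full; the proofs are below) =====
def Claim_equal_transform : Prop := ∀ (array : List Int), Dom_transform array → Spec_transform array (transform array)

-- ===== LEMMAS AND PROOFS =====

-- the value cell k of the result holds
def pvW (array : List Int) (k : Nat) : Int := if k < array.length then array.getD k 0 else 0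

theorem pv_inner_thread (arr : List Int) (i : Nat) :
    ∀ (n j0 : Nat) (m : List (List Int)),
    (List.range' j0 n).foldl (fun (st : List (List Int) × Nat) j =>
        if st.2 < arr.length then
          (st.1.set i ((st.1.getD i []).set j (arr.getD st.2 0)), st.2 + 1)
        else st) (m, min arr.length (10 * i + j0))
    = ((List.range' j0 n).foldl (fun m j =>
          if 10 * i + j < arr.length then m.set i ((m.getD i []).set j (arr.getD (10 * i + j) 0)) else m) m,
       min arr.length (10 * i + j0 + n)) := by
  intro n
  induction n with
  | zero => intro j0 m; simp
  | succ n ih =>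
    intro j0 m
    rw [List.range'_succ]
    simp only [List.foldl_cons]
    by_cases h : 10 * i + j0 < arr.length
    · have h1 : min arr.length (10 * i + j0) < arr.length := by omega
      have h2 : min arr.length (10 * i + j0) = 10 * i + j0 := by omega
      simp only [if_pos, h, h2]
      rw [show 10 * i + j0 + 1 = min arr.length (10 * i + (j0 + 1)) by omega]
      rw [ih (j0 + 1)]
      congr 1
      omega
    · have h1 : ¬ min arr.length (10 * i + j0) < arr.length := by omega
      simp only [h1, if_neg, h, not_false_iff]
      rw [show min arr.length (10 * i + j0) = min arr.length (10 * i + (j0 + 1)) by omega]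
      rw [ih (j0 + 1)]
      congr 1
      omega


theorem pv_outer_thread (arr : List Int) :
    ∀ (n i0 : Nat) (m : List (List Int)),
    (List.range' i0 n).foldl (fun st i =>
        (List.range' 0 10).foldl (fun (st : List (List Int) × Nat) j =>
          if st.2 < arr.length then
            (st.1.set i ((st.1.getD i []).set j (arr.getD st.2 0)), st.2 + 1)
          else st) st) (m, min arr.length (10 * i0))
    = ((List.range' i0 n).foldl (fun m i =>
          (List.range' 0 10).foldl (fun m j =>
            if 10 * i + j < arr.length then m.set i ((m.getD i []).set j (arr.getD (10 * i + j) 0)) else m) m) m,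
       min arr.length (10 * (i0 + n))) := by
  intro n
  induction n with
  | zero => intro i0 m; simp
  | succ n ih =>
    intro i0 m
    rw [show List.range' i0 (n+1) = i0 :: List.range' (i0+1) n from List.range'_succ, List.foldl_cons]
    rw [show min arr.length (10 * i0) = min arr.length (10 * i0 + 0) by omega]
    rw [pv_inner_thread arr i0 10 0 m]
    rw [show min arr.length (10 * i0 + 0 + 10) = min arr.length (10 * (i0 + 1)) by omega]
    rw [ih (i0 + 1)]
    rw [show min arr.length (10 * (i0 + 1 + n)) = min arr.length (10 * (i0 + (n + 1))) by omega]
    rw [List.foldl_cons]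

theorem pv_getD_append {α : Type} (pre : List α) (y : α) (t : List α) (d : α) :
    (pre ++ y :: t).getD pre.length d = y := by
  induction pre with
  | nil => rfl
  | cons a pre ih => simpa using ih

theorem pv_set_append {α : Type} (pre : List α) (y : α) (t : List α) (x : α) :
    (pre ++ y :: t).set pre.length x = pre ++ x :: t := by
  induction pre with
  | nil => rfl
  | cons a pre ih => simpa using ih

theorem pv_set_getD_self {α : Type} (m : List α) (i : Nat) (d : α) (h : i < m.length) :
    m.set i (m.getD i d) = m := by
  induction m generalizing i with
  | nil => simp at h
  | cons a m ih =>
    cases i with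
    | zero => rfl
    | succ i => simp only [List.set_cons_succ, List.getD_cons_succ]; rw [ih]; simpa using h

theorem pv_getD_set_self {α : Type} (m : List α) (i : Nat) (x : α) (d : α) (h : i < m.length) :
    (m.set i x).getD i d = x := by
  rw [List.getD_eq_getElem]
  · exact List.getElem_set_self _
  · simpa using h

theorem pv_matrix_inner (arr : List Int) (base i : Nat) :
    ∀ (js : List Nat) (m : List (List Int)), i < m.length →
    js.foldl (fun m j =>
        if base + j < arr.length then m.set i ((m.getD i []).set j (arr.getD (base + j) 0)) else m) m
    = m.set i (js.foldl (fun r j =>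
        if base + j < arr.length then r.set j (arr.getD (base + j) 0) else r) (m.getD i [])) := by
  intro js
  induction js with
  | nil => intro m h; exact (pv_set_getD_self m i [] h).symm
  | cons j js ih =>
    intro m h
    simp only [List.foldl_cons]
    by_cases c : base + j < arr.length
    · simp only [c, if_pos]
      rw [ih (m.set i ((m.getD i []).set j (arr.getD (base + j) 0))) (by simpa using h)]
      rw [pv_getD_set_self _ _ _ _ h, List.set_set]
    · simp only [c, if_neg, not_false_iff]
      exact ih m h

theorem pv_fill (arr : List Int) (base : Nat) :
    ∀ (n j0 : Nat) (pre : List Int), pre.length = j0 →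
    (List.range' j0 n).foldl (fun r j =>
        if base + j < arr.length then r.set j (arr.getD (base + j) 0) else r)
      (pre ++ List.replicate n 0)
    = pre ++ (List.range' j0 n).map (fun j => pvW arr (base + j)) := by
  intro n
  induction n with
  | zero => intro j0 pre _; simp
  | succ n ih =>
    intro j0 pre hpre
    rw [List.range'_succ, List.replicate_succ]
    simp only [List.foldl_cons, List.map_cons]
    have hstep : (if base + j0 < arr.length
        then (pre ++ (0 : Int) :: List.replicate n 0).set j0 (arr.getD (base + j0) 0)
        else pre ++ (0 : Int) :: List.replicate n 0)
        = (pre ++ [pvW arr (base + j0)]) ++ List.replicate n 0 := by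
      by_cases c : base + j0 < arr.length
      · simp only [c, if_pos, pvW]
        rw [← hpre, pv_set_append]
        simp
      · simp only [c, if_neg, not_false_iff, pvW]
        simp
    rw [hstep, ih (j0 + 1) (pre ++ [pvW arr (base + j0)]) (by simp [hpre])]
    simp

theorem pv_outer_rows (arr : List Int) :
    ∀ (n i0 : Nat) (pre : List (List Int)), pre.length = i0 →
    (List.range' i0 n).foldl (fun m i =>
        (List.range' 0 10).foldl (fun m j =>
          if 10 * i + j < arr.length then m.set i ((m.getD i []).set j (arr.getD (10 * i + j) 0)) else m) m)
      (pre ++ List.replicate n (List.replicate 10 0))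
    = pre ++ (List.range' i0 n).map (fun i => (List.range' 0 10).map (fun j => pvW arr (10 * i + j))) := by
  intro n
  induction n with
  | zero => intro i0 pre _; simp
  | succ n ih =>
    intro i0 pre hpre
    subst hpre
    rw [show List.range' pre.length (n+1) = pre.length :: List.range' (pre.length+1) n from
          List.range'_succ,
        List.replicate_succ, List.foldl_cons, List.map_cons]
    rw [pv_matrix_inner arr (10 * pre.length) pre.length (List.range' 0 10)
        (pre ++ List.replicate 10 0 :: List.replicate n (List.replicate 10 0))
        (by simp)]
    rw [pv_getD_append pre (List.replicate 10 0) _ []]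
    have hrow := pv_fill arr (10 * pre.length) 10 0 [] rfl
    simp only [List.nil_append] at hrow
    rw [hrow, pv_set_append]
    have hih := ih (pre.length + 1)
        (pre ++ [(List.range' 0 10).map (fun j => pvW arr (10 * pre.length + j))]) (by simp)
    simpa using hih

theorem pv_transform_eq (arr : List Int) :
    transform arr
    = (List.range' 0 10).map (fun i => (List.range' 0 10).map (fun j => pvW arr (10 * i + j))) := by
  unfold transform
  simp only [List.range_eq_range']
  have hinit : (List.range' 0 10).map (fun _ : Nat => (List.range' 0 10).map (fun _ : Nat => (0 : Int)))
      = List.replicate 10 (List.replicate 10 (0 : Int)) := by rfl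
  rw [hinit]
  have hmain := pv_outer_thread arr 10 0 (List.replicate 10 (List.replicate 10 (0 : Int)))
  rw [Nat.mul_zero, Nat.min_zero] at hmain
  rw [hmain]
  have hrows := pv_outer_rows arr 10 0 [] rfl
  simpa using hrows

theorem pv_padded_get (arr : List Int) (k : Nat) (hk : k < 100)
    (h : k < (arr.take 100 ++ List.replicate (100 - arr.length) (0 : Int)).length) :
    (arr.take 100 ++ List.replicate (100 - arr.length) (0 : Int))[k] = pvW arr k := by
  rcases Nat.lt_or_ge k arr.length with hc | hc
  · have hl : k < (arr.take 100).length := by simp; omega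
    rw [List.getElem_append_left hl]
    rw [List.getElem_take]
    simp [pvW, hc]
  · have hl : (arr.take 100).length ≤ k := by simp; omega
    rw [List.getElem_append_right hl]
    simp [pvW]
    omega

theorem pv_transform_alt_eq (arr : List Int) :
    transform_alt arr
    = (List.range' 0 10).map (fun i => (List.range' 0 10).map (fun j => pvW arr (10 * i + j))) := by
  unfold transform_alt
  simp only [List.range_eq_range']
  apply List.map_congr_left
  intro i hi
  have hi10 : i < 10 := by
    have := List.mem_range'_1.mp hi
    omega
  have hsl : PySem.List.slice arr none (some 100) = arr.take 100 := by
    rw [PySem.List.slice_to arr (by norm_num)]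
    rfl
  rw [hsl]
  have hc1 : ((i : Int) * 10) = ((10 * i : Nat) : Int) := by push_cast; ring
  have hc2 : (((i : Int) + 1) * 10) = ((10 * i : Nat) : Int) + ((10 : Nat) : Int) := by
    push_cast; ring
  rw [hc1, hc2, PySem.List.slice_natCast_add]
  have hplen : (arr.take 100 ++ List.replicate (100 - arr.length) (0 : Int)).length = 100 := by
    simp
    omega
  apply List.ext_getElem
  · simp [hplen]
    omega
  · intro k h1 h2
    have hk10 : k < 10 := by simpa using h2
    rw [List.getElem_take, List.getElem_drop]
    rw [List.getElem_map, List.getElem_range']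
    simp only [Nat.zero_add, Nat.one_mul]
    exact pv_padded_get arr (10 * i + k) (by omega) (by rw [hplen]; omega)

-- ===== VERDICT (by name: the statement is the Claim_ definition above) =====
theorem transform_spec : Claim_equal_transform := by
  intro array _
  unfold Spec_transform
  rw [pv_transform_eq, pv_transform_alt_eq]
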